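-- pv_equiv track=rewrite | github.com/sabihanjum/GFG_160 | Prefix Sum/no_times_graph_cuts_x_axis.py | touchedXaxis
-- ===== SOURCE A (Python) =====
-- def touchedXaxis(arr):
--     # code here
--     curPos = 0
--     times = 0
--     for i in range(len(arr)):
--         if curPos < 0 and curPos + arr[i] >= 0:
--             times += 1
--         elif curPos > 0 and curPos + arr[i] <= 0:
--             times += 1
--         curPos += arr[i]
--     return times
-- ===== SOURCE B (Python) =====
-- def touchedXaxis(arr):
--     # Sign-quantize the walk: record the sign of each position, run-length
--     # compress equal consecutive signs, then count run boundaries that leave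
--     # a nonzero sign (each such boundary is exactly one touch/cross of the axis).
--     signs = [0]
--     s = 0
--     for x in arr:
--         s += x
--         signs.append((s > 0) - (s < 0))
--     runs = []
--     for sg in signs:
--         if not runs or runs[-1] != sg:
--             runs.append(sg)
--     count = 0
--     for r in runs[:-1]:
--         if r != 0:
--             count += 1
--     return count
-- ===== Notes on version B (the rewrite author's own statement) =====
-- stated objective: alternative
-- what changed: B quantizes the walk into a list of position signs, run-length compresses equal consecutive signs, and counts run boundaries that leave a nonzero sign, instead of A's single loop testing inequalities on a running position.
import Mathlib
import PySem

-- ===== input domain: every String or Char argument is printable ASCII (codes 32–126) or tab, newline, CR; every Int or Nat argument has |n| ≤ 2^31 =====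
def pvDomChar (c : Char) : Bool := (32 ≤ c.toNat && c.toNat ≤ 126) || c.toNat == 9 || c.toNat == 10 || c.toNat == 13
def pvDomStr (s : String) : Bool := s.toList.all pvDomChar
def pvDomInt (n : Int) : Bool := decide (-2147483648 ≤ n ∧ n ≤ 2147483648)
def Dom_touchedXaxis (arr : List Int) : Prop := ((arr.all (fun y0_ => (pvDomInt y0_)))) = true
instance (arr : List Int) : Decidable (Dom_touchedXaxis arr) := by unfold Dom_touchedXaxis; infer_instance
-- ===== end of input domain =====

-- B sign-quantizes the walk, run-length compresses the sign list and counts run boundaries leaving a nonzero sign; A tests inequalities on one running position. Same O(n) cost.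

-- ===== PORT A =====
-- single loop over arr updating (curPos, times)
def touchedXaxis (arr : List Int) : Int :=
  (arr.foldl
    (fun (st : Int × Int) a =>
      let times :=
        if st.1 < 0 ∧ st.1 + a ≥ 0 then st.2 + 1
        else if st.1 > 0 ∧ st.1 + a ≤ 0 then st.2 + 1
        else st.2
      (st.1 + a, times)) (0, 0)).2

-- ===== PORT B =====
-- (s > 0) - (s < 0)
def pvSgn (s : Int) : Int := (if s > 0 then (1:Int) else 0) - (if s < 0 then (1:Int) else 0)

-- pass 1: signs of running positions, starting from the initial 0
def pvSignsB (arr : List Int) : List Int :=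
  (arr.foldl (fun (st : Int × List Int) x => (st.1 + x, st.2 ++ [pvSgn (st.1 + x)])) (0, [0])).2

-- pass 2: run-length compress consecutive equal signs
def pvRunsB (signs : List Int) : List Int :=
  signs.foldl (fun runs sg => if runs = [] ∨ runs.getLast? ≠ some sg then runs ++ [sg] else runs) []

-- pass 3: count nonzero entries
def pvNZ (l : List Int) : Int := l.foldl (fun c r => if r ≠ 0 then c + 1 else c) 0

def touchedXaxis_alt (arr : List Int) : Int :=
  pvNZ ((pvRunsB (pvSignsB arr)).dropLast)

-- ===== PRECONDITION & SPEC =====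
def Spec_touchedXaxis (arr : List Int) (out : Int) : Prop := out = touchedXaxis_alt arr
instance (arr : List Int) (out : Int) : Decidable (Spec_touchedXaxis arr out) := by unfold Spec_touchedXaxis; infer_instance

-- ===== CLAIM (what is proved, stated in full; the proofs are below) =====
def Claim_equal_touchedXaxis : Prop := ∀ (arr : List Int), Dom_touchedXaxis arr → Spec_touchedXaxis arr (touchedXaxis arr)

-- ===== LEMMAS AND PROOFS =====

-- reference count: recursive form of A's loop
def pvCnt (c : Int) : List Int → Int
  | [] => 0
  | x :: xs => (if (c < 0 ∧ c + x ≥ 0) ∨ (c > 0 ∧ c + x ≤ 0) then 1 else 0) + pvCnt (c + x) xs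

-- signs generated from current position c
def pvSignsFrom (c : Int) : List Int → List Int
  | [] => []
  | x :: xs => pvSgn (c + x) :: pvSignsFrom (c + x) xs

-- recursive form of B's boundary count, given the sign of the current run
def pvF (a : Int) : List Int → Int
  | [] => 0
  | s :: l => if s = a then pvF a l else (if a ≠ 0 then 1 else 0) + pvF s l

theorem pvNZ_acc (l : List Int) (n : Int) :
    l.foldl (fun c r => if r ≠ 0 then c + 1 else c) n = n + pvNZ l := by
  induction l generalizing n with
  | nil => simp [pvNZ]
  | cons x xs ih =>
    simp only [pvNZ, List.foldl]
    rw [ih, ih (if x ≠ 0 then (0:Int) + 1 else 0)]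
    split_ifs <;> ring

theorem pvNZ_concat (l : List Int) (a : Int) :
    pvNZ (l ++ [a]) = pvNZ l + (if a ≠ 0 then 1 else 0) := by
  simp only [pvNZ, List.foldl_append, List.foldl]
  rw [pvNZ_acc]
  split_ifs <;> ring

-- A's fold from an arbitrary state
theorem pvA_acc (arr : List Int) (c t : Int) :
    (arr.foldl
      (fun (st : Int × Int) a =>
        let times :=
          if st.1 < 0 ∧ st.1 + a ≥ 0 then st.2 + 1
          else if st.1 > 0 ∧ st.1 + a ≤ 0 then st.2 + 1
          else st.2
        (st.1 + a, times)) (c, t)).2 = t + pvCnt c arr := by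
  induction arr generalizing c t with
  | nil => simp [pvCnt]
  | cons x xs ih =>
    simp only [List.foldl, pvCnt]
    rw [ih]
    split_ifs <;> omega

-- pass 1 from an arbitrary accumulator
theorem pvSignsB_acc (arr : List Int) (c : Int) (l : List Int) :
    (arr.foldl (fun (st : Int × List Int) x => (st.1 + x, st.2 ++ [pvSgn (st.1 + x)])) (c, l)).2
      = l ++ pvSignsFrom c arr := by
  induction arr generalizing c l with
  | nil => simp [pvSignsFrom]
  | cons x xs ih => simp [List.foldl, pvSignsFrom, ih]

-- pass 2+3 invariant: the run accumulator is r0 ++ [a] (last run sign a)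
theorem pvRuns_acc (l : List Int) (r0 : List Int) (a : Int) :
    pvNZ ((l.foldl (fun runs sg => if runs = [] ∨ runs.getLast? ≠ some sg then runs ++ [sg] else runs) (r0 ++ [a])).dropLast)
      = pvNZ r0 + pvF a l := by
  induction l generalizing r0 a with
  | nil => simp [pvF]
  | cons s l ih =>
    simp only [List.foldl, pvF]
    by_cases h : s = a
    · subst h
      rw [if_neg (by simp)]
      rw [if_pos rfl]
      exact ih r0 s
    · rw [if_pos (Or.inr (by simp; omega))]
      rw [if_neg h]
      rw [List.append_assoc] at *
      rw [show r0 ++ ([a] ++ [s]) = (r0 ++ [a]) ++ [s] by simp]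
      rw [ih (r0 ++ [a]) s, pvNZ_concat]
      ring

-- the sign-boundary count equals A's crossing count
theorem pvF_cnt (arr : List Int) (c : Int) :
    pvF (pvSgn c) (pvSignsFrom c arr) = pvCnt c arr := by
  induction arr generalizing c with
  | nil => simp [pvF, pvCnt, pvSignsFrom]
  | cons x xs ih =>
    simp only [pvSignsFrom, pvF, pvCnt]
    by_cases h : pvSgn (c + x) = pvSgn c
    · rw [if_pos h, ← h, ih]
      have hz : (if (c < 0 ∧ c + x ≥ 0) ∨ (c > 0 ∧ c + x ≤ 0) then (1:Int) else 0) = 0 := by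
        simp only [pvSgn] at h
        split_ifs at h ⊢ <;> omega
      rw [hz]
      ring
    · rw [if_neg h, ih]
      have he : (if pvSgn c ≠ 0 then (1:Int) else 0)
          = (if (c < 0 ∧ c + x ≥ 0) ∨ (c > 0 ∧ c + x ≤ 0) then 1 else 0) := by
        simp only [pvSgn] at h ⊢
        split_ifs at h ⊢ <;> omega
      rw [he]

-- ===== VERDICT (by name: the statement is the Claim_ definition above) =====
theorem touchedXaxis_spec : Claim_equal_touchedXaxis := by
  intro arr _
  unfold Spec_touchedXaxis touchedXaxis touchedXaxis_alt pvSignsB pvRunsB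
  rw [pvA_acc, pvSignsB_acc]
  have h1 : (([0] ++ pvSignsFrom 0 arr).foldl
      (fun runs sg => if runs = [] ∨ runs.getLast? ≠ some sg then runs ++ [sg] else runs) ([] : List Int))
      = (pvSignsFrom 0 arr).foldl
      (fun runs sg => if runs = [] ∨ runs.getLast? ≠ some sg then runs ++ [sg] else runs) (([] : List Int) ++ [0]) := by
    simp
  rw [h1, pvRuns_acc]
  have h2 := pvF_cnt arr 0
  have h0 : pvSgn 0 = 0 := by decide
  rw [h0] at h2
  rw [h2]
  simp [pvNZ]
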